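-- pv_equiv track=rewrite | github.com/jxu/op-reject-rule | src/577.py | H
-- ===== SOURCE A (Python) =====
-- def H(n):
--     result = 0
--     m = n-2
--     hexagons = 1
--     while m >= 1:
--         result += hexagons * m*(m+1)//2
--         hexagons += 1
--         m -= 3
--
--     return result
-- ===== SOURCE B (Python) =====
-- def H(n):
--     # closed form: sum_{k=0}^{K-1} (k+1)*(a-3k)*(a-3k+1)//2 with a = n-2,
--     # evaluated with power-sum formulas (O(1) instead of A's O(n) loop)
--     if n < 3:
--         return 0
--     K = (n - 3) // 3 + 1
--     a = n - 2
--     s1 = K * (K - 1) // 2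
--     s2 = K * (K - 1) * (2 * K - 1) // 6
--     s3 = s1 * s1
--     return ((a * a + a) * (K + s1) - 3 * (2 * a + 1) * (s1 + s2) + 9 * (s2 + s3)) // 2
-- ===== Notes on version B (the rewrite author's own statement) =====
-- stated objective: faster
-- what changed: Replaced A's decreasing-step while loop with a closed-form evaluation: the iteration count K is computed by one floor division and the weighted triangular sum is expressed via power-sum formulas (sums of k, k^2, k^3), all in exact integer arithmetic.
import Mathlib
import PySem

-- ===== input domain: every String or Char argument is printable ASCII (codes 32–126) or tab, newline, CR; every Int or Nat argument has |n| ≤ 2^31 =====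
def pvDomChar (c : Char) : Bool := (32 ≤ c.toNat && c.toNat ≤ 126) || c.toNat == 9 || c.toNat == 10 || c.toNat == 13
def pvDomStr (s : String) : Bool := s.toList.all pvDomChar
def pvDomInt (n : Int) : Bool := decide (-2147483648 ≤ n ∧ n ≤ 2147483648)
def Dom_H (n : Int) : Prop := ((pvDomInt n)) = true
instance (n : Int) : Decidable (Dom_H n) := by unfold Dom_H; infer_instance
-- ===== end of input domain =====

-- B replaces A's O(n) decreasing-step loop by an O(1) closed form via power-sum formulas.

-- ===== PORT A =====
-- while m >= 1: result += hexagons * m*(m+1)//2; hexagons += 1; m -= 3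
def Hloop (m hexagons result : Int) : Int :=
  if m ≥ 1 then
    Hloop (m - 3) (hexagons + 1) (result + hexagons * PySem.Int.floordiv (m * (m + 1)) 2)
  else result
termination_by m.toNat
decreasing_by omega

def H (n : Int) : Int := Hloop (n - 2) 1 0

-- ===== PORT B =====
def H_alt (n : Int) : Int :=
  if n < 3 then 0
  else
    let K := PySem.Int.floordiv (n - 3) 3 + 1
    let a := n - 2
    let s1 := PySem.Int.floordiv (K * (K - 1)) 2
    let s2 := PySem.Int.floordiv (K * (K - 1) * (2 * K - 1)) 6
    let s3 := s1 * s1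
    PySem.Int.floordiv ((a * a + a) * (K + s1) - 3 * (2 * a + 1) * (s1 + s2) + 9 * (s2 + s3)) 2

-- ===== PRECONDITION & SPEC =====
def Spec_H (n : Int) (out : Int) : Prop := out = H_alt n
instance (n : Int) (out : Int) : Decidable (Spec_H n out) := by unfold Spec_H; infer_instance

-- ===== CLAIM (what is proved, stated in full; the proofs are below) =====
def Claim_equal_H : Prop := ∀ (n : Int), Dom_H n → Spec_H n (H n)

-- ===== LEMMAS AND PROOFS =====

-- fuel-indexed spec of A's loop body (stops like the loop does)
def gsum : Nat → Int → Int → Int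
  | 0, _, _ => 0
  | Nat.succ K, m, h =>
      if m ≥ 1 then h * PySem.Int.floordiv (m * (m + 1)) 2 + gsum K (m - 3) (h + 1) else 0

-- the closed-form polynomial: 24 * gsum (when the fuel is exactly the iteration count)
def Q (K m h : Int) : Int :=
  12 * h * K * (m * m + m) + 6 * K * (K - 1) * (m * m + m)
    - 18 * h * K * (K - 1) * (2 * m + 1) - 6 * K * (K - 1) * (2 * K - 1) * (2 * m + 1)
    + 18 * h * K * (K - 1) * (2 * K - 1) + 27 * K * K * (K - 1) * (K - 1)

theorem tri_exact (m : Int) : PySem.Int.floordiv (m * (m + 1)) 2 * 2 = m * (m + 1) := by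
  rw [PySem.Int.floordiv_eq_ediv_of_pos (by omega)]
  exact Int.ediv_mul_cancel (Int.even_mul_succ_self m).two_dvd

theorem loop_eq_gsum (K : Nat) : ∀ (m h r : Int), m ≤ 3 * (K : Int) →
    Hloop m h r = r + gsum K m h := by
  induction K with
  | zero =>
      intro m h r hm
      rw [Hloop, gsum]
      simp at hm ⊢
      omega
  | succ K ih =>
      intro m h r hm
      rw [Hloop, gsum]
      by_cases hg : m ≥ 1
      · simp only [if_pos hg]
        rw [ih (m - 3) (h + 1) _ (by omega)]
        ring
      · simp only [if_neg hg]; ring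

theorem gsum_closed (K : Nat) : ∀ (m h : Int), 3 * (K : Int) - 2 ≤ m →
    24 * gsum K m h = Q (K : Int) m h := by
  induction K with
  | zero => intro m h _; simp [gsum, Q]
  | succ K ih =>
      intro m h hm
      have hg : m ≥ 1 := by push_cast at hm; omega
      rw [gsum, if_pos hg]
      have ht := tri_exact m
      have hQ := ih (m - 3) (h + 1) (by push_cast at hm ⊢; omega)
      have : 24 * (h * PySem.Int.floordiv (m * (m + 1)) 2 + gsum K (m - 3) (h + 1))
          = 12 * h * (PySem.Int.floordiv (m * (m + 1)) 2 * 2) + 24 * gsum K (m - 3) (h + 1) := by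
        ring
      rw [this, ht, hQ]
      unfold Q
      push_cast
      ring

theorem six_dvd_sq_pyramid (j : Nat) : (6 : Int) ∣ (j : Int) * ((j : Int) - 1) * (2 * (j : Int) - 1) := by
  induction j with
  | zero => simp
  | succ j ih =>
      obtain ⟨c, hc⟩ := ih
      exact ⟨c + (j : Int) * (j : Int), by push_cast; nlinarith [hc]⟩

theorem exact_div {x d : Int} (hd : 0 < d) (hdvd : d ∣ x) :
    PySem.Int.floordiv x d * d = x := by
  rw [PySem.Int.floordiv_eq_ediv_of_pos hd]
  exact Int.ediv_mul_cancel hdvd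

-- ===== VERDICT (by name: the statement is the Claim_ definition above) =====
theorem H_spec : Claim_equal_H := by
  intro n _
  unfold Spec_H H H_alt
  by_cases hn : n < 3
  · rw [if_pos hn, Hloop, if_neg (by omega)]
  · rw [if_neg hn]
    -- q = (n-3)//3, K = q+1 is the exact iteration count
    set q := PySem.Int.floordiv (n - 3) 3 with hq
    have hq3 : q * 3 ≤ n - 3 ∧ n - 3 < (q + 1) * 3 :=
      (PySem.Int.floordiv_eq_iff_of_pos (by omega)).mp hq.symm
    have hq0 : 0 ≤ q := by omega
    have hKnat : ((q + 1).toNat : Int) = q + 1 := by omega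
    have hL1 := loop_eq_gsum (q + 1).toNat (n - 2) 1 0 (by rw [hKnat]; omega)
    have hL2 := gsum_closed (q + 1).toNat (n - 2) 1 (by rw [hKnat]; omega)
    rw [hKnat] at hL2
    -- exact values of the floor divisions in B
    have hs1 : PySem.Int.floordiv ((q + 1) * (q + 1 - 1)) 2 * 2 = (q + 1) * (q + 1 - 1) :=
      exact_div (by omega) (by
        have := Int.even_mul_succ_self q
        simpa [mul_comm] using this.two_dvd)
    have hs2 : PySem.Int.floordiv ((q + 1) * (q + 1 - 1) * (2 * (q + 1) - 1)) 6 * 6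
        = (q + 1) * (q + 1 - 1) * (2 * (q + 1) - 1) :=
      exact_div (by omega) (by
        have h6 := six_dvd_sq_pyramid (q + 1).toNat
        rw [hKnat] at h6
        exact h6)
    set s1 := PySem.Int.floordiv ((q + 1) * (q + 1 - 1)) 2 with hs1d
    set s2 := PySem.Int.floordiv ((q + 1) * (q + 1 - 1) * (2 * (q + 1) - 1)) 6 with hs2d
    set N := ((n - 2) * (n - 2) + (n - 2)) * (q + 1 + s1)
        - 3 * (2 * (n - 2) + 1) * (s1 + s2) + 9 * (s2 + s1 * s1) with hN
    have h12N : 12 * N = Q (q + 1) (n - 2) 1 := by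
      rw [hN]
      unfold Q
      linear_combination (6 * ((n - 2) * (n - 2) + (n - 2)) - 18 * (2 * (n - 2) + 1)
          + 27 * (s1 * 2 + (q + 1) * (q + 1 - 1))) * hs1
        + (-6 * (2 * (n - 2) + 1) + 18) * hs2
    have hN2 : N = 2 * gsum (q + 1).toNat (n - 2) 1 := by omega
    have hfin : PySem.Int.floordiv N 2 = gsum (q + 1).toNat (n - 2) 1 := by
      rw [hN2, PySem.Int.floordiv_eq_ediv_of_pos (by omega : (0:Int) < 2)]
      omega
    simp only [hL1, zero_add]
    rw [← hfin]
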